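-- pv_equiv track=rewrite | github.com/manfredkarl/OneStopAgent | src/python-api/agents/azure_specialist_agent.py | _get_core_sku
-- ===== SOURCE A (Python) =====
-- CORE_SKU_MATRIX = {
--     "Azure App Service":     ["B1",          "S1",           "P2v3",            "P3v3"],
--     "Azure SQL Database":    ["Basic",       "Standard S1",  "Premium P4",      "Business Critical"],
--     "Azure Cache for Redis": ["C0",          "C1",           "P1",              "P3"],
--     "Azure Cosmos DB":       ["Serverless",  "Autoscale 1000 RU/s", "Autoscale 10000 RU/s", "Autoscale 50000 RU/s"],
--     "Azure Functions":       ["Consumption", "Consumption",  "Premium EP1",     "Premium EP3"],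
-- }
--
-- SCALE_TIERS = [100, 1000, 10000, float("inf")]
--
-- def _get_core_sku(service_name: str, users: int) -> str | None:
--     skus = CORE_SKU_MATRIX.get(service_name)
--     if not skus:
--         return None
--     for i, threshold in enumerate(SCALE_TIERS):
--         if users <= threshold:
--             return skus[i]
--     return skus[-1]
-- ===== SOURCE B (Python) =====
-- CORE_SKU_MATRIX = {
--     "Azure App Service":     ["B1",          "S1",           "P2v3",            "P3v3"],
--     "Azure SQL Database":    ["Basic",       "Standard S1",  "Premium P4",      "Business Critical"],
--     "Azure Cache for Redis": ["C0",          "C1",           "P1",              "P3"],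
--     "Azure Cosmos DB":       ["Serverless",  "Autoscale 1000 RU/s", "Autoscale 10000 RU/s", "Autoscale 50000 RU/s"],
--     "Azure Functions":       ["Consumption", "Consumption",  "Premium EP1",     "Premium EP3"],
-- }
--
-- BOUNDARIES = [100, 1000, 10000]  # finite thresholds; above all of them -> last SKU
--
-- def _get_core_sku(service_name: str, users: int) -> str | None:
--     skus = CORE_SKU_MATRIX.get(service_name)
--     if not skus:
--         return None
--     # binary search: lo ends as the index of the first boundary >= users
--     lo, hi = 0, len(BOUNDARIES)
--     while lo < hi:
--         mid = (lo + hi) // 2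
--         if BOUNDARIES[mid] < users:
--             lo = mid + 1
--         else:
--             hi = mid
--     return skus[min(lo, len(skus) - 1)]
-- ===== Notes on version B (the rewrite author's own statement) =====
-- stated objective: alternative
-- what changed: Replaces the enumerate-and-scan over SCALE_TIERS (with a float('inf') sentinel to force the last branch) by a binary search over the three finite boundaries, clamping the resulting index to the last SKU.
import Mathlib
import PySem

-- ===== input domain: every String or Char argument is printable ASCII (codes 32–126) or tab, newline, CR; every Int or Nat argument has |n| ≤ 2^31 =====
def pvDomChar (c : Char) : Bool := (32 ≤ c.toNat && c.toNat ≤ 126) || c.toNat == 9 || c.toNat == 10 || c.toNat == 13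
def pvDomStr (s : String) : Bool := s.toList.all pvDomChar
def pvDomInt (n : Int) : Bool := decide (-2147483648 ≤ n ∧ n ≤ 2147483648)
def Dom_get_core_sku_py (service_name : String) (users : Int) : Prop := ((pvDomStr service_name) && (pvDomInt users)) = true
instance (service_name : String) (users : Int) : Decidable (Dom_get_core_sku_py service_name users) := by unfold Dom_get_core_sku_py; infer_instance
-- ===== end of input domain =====

-- B replaces A's linear scan over SCALE_TIERS (with its float('inf') sentinel) by a binary
-- search over the three finite boundaries with a clamped index (alternative decomposition).

-- ===== PORT A =====
-- CORE_SKU_MATRIX (shared module constant)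
def coreSkuMatrix : PySem.Dict String (List String) := PySem.Dict.mk
  [ ("Azure App Service",     ["B1",          "S1",           "P2v3",            "P3v3"]),
    ("Azure SQL Database",    ["Basic",       "Standard S1",  "Premium P4",      "Business Critical"]),
    ("Azure Cache for Redis", ["C0",          "C1",           "P1",              "P3"]),
    ("Azure Cosmos DB",       ["Serverless",  "Autoscale 1000 RU/s", "Autoscale 10000 RU/s", "Autoscale 50000 RU/s"]),
    ("Azure Functions",       ["Consumption", "Consumption",  "Premium EP1",     "Premium EP3"]) ]

-- SCALE_TIERS: float('inf') is represented as `none` (users <= inf is always true); exact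
-- for this use since inf is only ever compared with an int.
def scaleTiers : List (Option Int) := [some 100, some 1000, some 10000, none]

-- the `for i, threshold in enumerate(SCALE_TIERS): if users <= threshold: return skus[i]` loop
def tierScan (users : Int) : Nat → List (Option Int) → Option Nat
  | _, [] => none
  | i, t :: rest =>
      if (match t with | none => true | some v => users ≤ v) then some i
      else tierScan users (i + 1) rest

def get_core_sku_py (service_name : String) (users : Int) : Option String :=
  match coreSkuMatrix.get? service_name with
  | none => none
  | some skus =>
      if skus = [] then none
      else
        match tierScan users 0 scaleTiers with
        | some i => PySem.List.pyGet? skus (i : Int)     -- return skus[i]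
        | none   => PySem.List.pyGet? skus (-1 : Int)    -- return skus[-1]

-- ===== PORT B =====
def boundariesB : List Int := [100, 1000, 10000]

-- hand-written binary search loop from Source B (decreasing measure hi - lo)
def bsearchLoop (users : Int) (lo hi : Nat) : Nat :=
  if h : lo < hi then
    let mid := (lo + hi) / 2
    if PySem.List.pyGetD boundariesB (mid : Int) 0 < users then
      bsearchLoop users (mid + 1) hi
    else
      bsearchLoop users lo mid
  else lo
termination_by hi - lo
decreasing_by all_goals omega

def get_core_sku_py_alt (service_name : String) (users : Int) : Option String :=
  match coreSkuMatrix.get? service_name with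
  | none => none
  | some skus =>
      if skus = [] then none
      else
        let lo := bsearchLoop users 0 boundariesB.length
        PySem.List.pyGet? skus (min lo (skus.length - 1) : Int)

-- ===== PRECONDITION & SPEC =====
def Spec_get_core_sku_py (service_name : String) (users : Int) (out : Option String) : Prop := out = get_core_sku_py_alt service_name users
instance (service_name : String) (users : Int) (out : Option String) : Decidable (Spec_get_core_sku_py service_name users out) := by unfold Spec_get_core_sku_py; infer_instance

-- ===== CLAIM (what is proved, stated in full; the proofs are below) =====
def Claim_equal_get_core_sku_py : Prop := ∀ (service_name : String) (users : Int), Dom_get_core_sku_py service_name users → Spec_get_core_sku_py service_name users (get_core_sku_py service_name users)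

-- ===== LEMMAS AND PROOFS =====

-- for any length-4 sku list, A's scan-and-index equals B's search-and-clamp
lemma bsearch_val (users : Int) :
    bsearchLoop users 0 boundariesB.length =
      if users ≤ 100 then 0 else if users ≤ 1000 then 1 else if users ≤ 10000 then 2 else 3 := by
  simp only [boundariesB, List.length_cons, List.length_nil]
  simp [bsearchLoop, boundariesB, PySem.List.pyGetD]
  split_ifs <;> omega

lemma branch_eq (users : Int) (s0 s1 s2 s3 : String) :
    (match tierScan users 0 scaleTiers with
      | some i => PySem.List.pyGet? [s0, s1, s2, s3] (i : Int)
      | none   => PySem.List.pyGet? [s0, s1, s2, s3] (-1 : Int)) =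
    PySem.List.pyGet? [s0, s1, s2, s3]
      (min (bsearchLoop users 0 boundariesB.length) (([s0, s1, s2, s3].length : Nat) - 1) : Int) := by
  rw [bsearch_val]
  by_cases h1 : users ≤ 100 <;> by_cases h2 : users ≤ 1000 <;> by_cases h3 : users ≤ 10000 <;>
    first
      | omega
      | simp [tierScan, scaleTiers, PySem.List.pyGet?, PySem.List.pyIdx?, h1, h2, h3]

-- ===== VERDICT (by name: the statement is the Claim_ definition above) =====
theorem get_core_sku_py_spec : Claim_equal_get_core_sku_py := by
  intro name users _
  unfold Spec_get_core_sku_py get_core_sku_py get_core_sku_py_alt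
  simp only [coreSkuMatrix, PySem.Dict.get?_mk_cons]
  split_ifs <;>
    first
      | rfl
      | exact branch_eq users _ _ _ _
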